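-- pv_equiv track=rewrite | github.com/Viciooo/ASD | Freestyle/do_2_kolosa/other/recStairsOfAmazon.py | howManyWays
-- ===== SOURCE A (Python) =====
-- def howManyWays(A):
--     n = len(A)
--     F = [0]*n
--     F[0] = 1
--     for i in range(n):
--         for j in range(1,A[i]+1):
--             if i+j < n:
--                 F[i+j] += F[i]
--     return F
-- ===== SOURCE B (Python) =====
-- def howManyWays(A):
--     n = len(A)
--     # difference array: ways[k] = prefix sum of diff up to k; each position i
--     # contributes its count to the clamped range [i+1, i+A[i]] via two updates.
--     diff = [0] * (n + 1)
--     if n: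
--         diff[0] = 1
--         diff[1] = -1
--     run = 0
--     out = []
--     for i in range(n):
--         run += diff[i]
--         out.append(run)
--         hi = A[i] if A[i] < n - 1 - i else n - 1 - i
--         if hi >= 1:
--             diff[i + 1] += run
--             diff[i + hi + 1] -= run
--     return out
-- ===== Notes on version B (the rewrite author's own statement) =====
-- stated objective: faster
-- what changed: Replaces A's per-position inner loop of point updates (F[i+j] += F[i] for each j up to A[i]) with a difference array: one clamped O(1) range update plus a running prefix sum per position, single O(n) pass.
import Mathlib
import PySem

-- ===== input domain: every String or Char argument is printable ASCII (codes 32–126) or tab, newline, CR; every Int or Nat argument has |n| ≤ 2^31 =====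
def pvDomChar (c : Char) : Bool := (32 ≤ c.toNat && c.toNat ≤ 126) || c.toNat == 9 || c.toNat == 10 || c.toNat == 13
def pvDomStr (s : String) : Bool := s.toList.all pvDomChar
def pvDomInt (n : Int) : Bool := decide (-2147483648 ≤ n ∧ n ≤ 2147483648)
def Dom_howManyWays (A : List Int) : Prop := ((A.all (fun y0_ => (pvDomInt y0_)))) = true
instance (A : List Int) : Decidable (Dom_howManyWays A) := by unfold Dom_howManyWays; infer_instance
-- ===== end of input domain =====

-- B replaces A's per-position inner loop of point updates (O(sum A[i])) by a
-- difference array with one clamped range update and a running prefix sum per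
-- position (O(n)); same return value on every non-empty list.

-- ===== PORT A =====
def howManyWays (A : List Int) : List Int :=
  let n := A.length
  let F := List.replicate n (0:Int)
  let F := F.set 0 1   -- Python: F[0]=1 (IndexError on the empty list: excluded by Pre_)
  (List.range n).foldl (fun F i =>
    (PySem.List.pyRange 1 (A.getD i 0 + 1) 1).foldl (fun F j =>
      if (i : Int) + j < (n : Int) then
        F.set ((i:Int)+j).toNat (F.getD ((i:Int)+j).toNat 0 + F.getD i 0)
      else F) F) F

-- ===== PORT B =====
def howManyWays_alt (A : List Int) : List Int :=
  let n := A.length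
  let diff := List.replicate (n+1) (0:Int)
  let diff := if n ≠ 0 then (diff.set 0 1).set 1 (-1) else diff
  let st := (List.range n).foldl (fun (st : List Int × Int × List Int) i =>
    let diff := st.1
    let run := st.2.1 + diff.getD i 0
    let out := st.2.2 ++ [run]
    let ai := A.getD i 0
    let hi : Int := if ai < (n:Int) - 1 - (i:Int) then ai else (n:Int) - 1 - (i:Int)
    let diff := if hi ≥ 1 then
        let d1 := diff.set (i+1) (diff.getD (i+1) 0 + run)
        d1.set ((i:Int)+hi+1).toNat (d1.getD ((i:Int)+hi+1).toNat 0 - run)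
      else diff
    (diff, run, out)) (diff, 0, [])
  st.2.2

-- ===== PRECONDITION & SPEC =====
-- Pre_ excludes only the empty list, on which A raises IndexError when setting the first cell.
def Pre_howManyWays (A : List Int) : Prop := A ≠ []
instance (A : List Int) : Decidable (Pre_howManyWays A) := by unfold Pre_howManyWays; infer_instance
def pvWitness_howManyWays : List Int := ([2, 1, 0])

def Spec_howManyWays (A : List Int) (out : List Int) : Prop := out = howManyWays_alt A
instance (A : List Int) (out : List Int) : Decidable (Spec_howManyWays A out) := by unfold Spec_howManyWays; infer_instance

-- ===== CLAIM (what is proved, stated in full; the proofs are below) =====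
def Claim_equal_howManyWays : Prop := ∀ (A : List Int), Dom_howManyWays A → Pre_howManyWays A → Spec_howManyWays A (howManyWays A)

-- ===== LEMMAS AND PROOFS =====

-- Proof helpers: A's inner loop / both folds as functions of the step index.
def pvInner (A : List Int) (i : Nat) (j0 b : Int) (F : List Int) : List Int :=
  (PySem.List.pyRange j0 b 1).foldl (fun F j =>
    if (i : Int) + j < (A.length : Int) then
      F.set ((i:Int)+j).toNat (F.getD ((i:Int)+j).toNat 0 + F.getD i 0)
    else F) F

def pvStepA (A : List Int) (F : List Int) (i : Nat) : List Int :=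
  pvInner A i 1 (A.getD i 0 + 1) F

def pvSA (A : List Int) (i : Nat) : List Int :=
  (List.range i).foldl (pvStepA A) ((List.replicate A.length (0:Int)).set 0 1)

def pvStepB (A : List Int) (st : List Int × Int × List Int) (i : Nat) : List Int × Int × List Int :=
  let n := A.length
  let diff := st.1
  let run := st.2.1 + diff.getD i 0
  let out := st.2.2 ++ [run]
  let ai := A.getD i 0
  let hi : Int := if ai < (n:Int) - 1 - (i:Int) then ai else (n:Int) - 1 - (i:Int)
  let diff := if hi ≥ 1 then
      let d1 := diff.set (i+1) (diff.getD (i+1) 0 + run)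
      d1.set ((i:Int)+hi+1).toNat (d1.getD ((i:Int)+hi+1).toNat 0 - run)
    else diff
  (diff, run, out)

def pvSB (A : List Int) (i : Nat) : List Int × Int × List Int :=
  (List.range i).foldl (pvStepB A)
    ((if A.length ≠ 0 then ((List.replicate (A.length+1) (0:Int)).set 0 1).set 1 (-1)
      else List.replicate (A.length+1) (0:Int)), 0, [])

def pvPre (d : List Int) (m : Nat) : Int := (d.take m).sum


lemma pvHowA_eq (A : List Int) : howManyWays A = pvSA A A.length := rfl

lemma pvHowB_eq (A : List Int) : howManyWays_alt A = (pvSB A A.length).2.2 := rfl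


lemma pvGetD_set (xs : List Int) (m k : Nat) (v : Int) (hm : m < xs.length) :
    (xs.set m v).getD k 0 = if m = k then v else xs.getD k 0 := by
  simp [List.getD_eq_getElem?_getD, List.getElem?_set]
  split_ifs with h1 <;> simp_all

lemma pvSum_take_set (d : List Int) (p : Nat) (v : Int) (m : Nat) (hp : p < d.length) :
    ((d.set p v).take m).sum = (d.take m).sum + (if p < m then v - d.getD p 0 else 0) := by
  induction d generalizing p m with
  | nil => simp at hp
  | cons a d ih =>
    cases p with
    | zero =>
      cases m with
      | zero => simp
      | succ m => simp [List.set]; ring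
    | succ p =>
      cases m with
      | zero => simp
      | succ m =>
        simp only [List.set, List.take_succ_cons, List.sum_cons, List.getD_cons_succ]
        rw [ih p m (by simpa using hp)]
        split_ifs with h1 h2 <;> omega

lemma pvPre_succ (d : List Int) (m : Nat) (hm : m < d.length) :
    pvPre d (m+1) = pvPre d m + d.getD m 0 := by
  unfold pvPre
  rw [List.sum_take_succ d m hm, List.getD_eq_getElem?_getD]
  simp [List.getElem?_eq_getElem hm]

lemma pvTake_eq (xs ys : List Int) (hl : xs.length = ys.length) (m : Nat)
    (h : ∀ k, k < m → xs.getD k 0 = ys.getD k 0) : xs.take m = ys.take m := by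
  apply List.ext_getElem (by simp [hl])
  intro k h1 h2
  simp only [List.getElem_take]
  have hk : k < m := by simp at h1; omega
  have := h k hk
  have hkx : k < xs.length := by simp at h1; omega
  have hky : k < ys.length := by omega
  simpa [List.getD_eq_getElem?_getD, List.getElem?_eq_getElem, hkx, hky] using this

lemma pvInner_cons (A : List Int) (i : Nat) (j0 b : Int) (h : j0 < b) (F : List Int) :
    pvInner A i j0 b F = pvInner A i (j0+1) b
      (if (i:Int)+j0 < (A.length : Int) then
        F.set ((i:Int)+j0).toNat (F.getD ((i:Int)+j0).toNat 0 + F.getD i 0) else F) := by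
  unfold pvInner
  rw [PySem.List.pyRange_one_cons h, List.foldl_cons]

lemma pvInner_nil (A : List Int) (i : Nat) (j0 b : Int) (h : b ≤ j0) (F : List Int) :
    pvInner A i j0 b F = F := by
  unfold pvInner
  rw [PySem.List.pyRange_one_eq_nil h, List.foldl_nil]

lemma pvInnerGen (A : List Int) (i : Nat) (b : Int) :
    ∀ (m : Nat) (j0 : Int), 1 ≤ j0 → (b - j0).toNat = m → ∀ F : List Int, F.length = A.length →
      (pvInner A i j0 b F).length = A.length ∧
      ∀ k : Nat, (pvInner A i j0 b F).getD k 0 =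
        F.getD k 0 + (if (i:Int) + j0 ≤ (k:Int) ∧ (k:Int) < (i:Int) + b ∧ k < A.length then F.getD i 0 else 0) := by
  intro m
  induction m with
  | zero =>
    intro j0 hj0 hm F hF
    rw [pvInner_nil A i j0 b (by omega) F]
    refine ⟨hF, fun k => ?_⟩
    rw [if_neg (by omega)]; ring
  | succ m ih =>
    intro j0 hj0 hm F hF
    have hlt : j0 < b := by omega
    rw [pvInner_cons A i j0 b hlt F]
    by_cases hc : (i:Int)+j0 < (A.length : Int)
    · rw [if_pos hc]
      have hplen : ((i:Int)+j0).toNat < F.length := by omega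
      have hpi : ((i:Int)+j0).toNat ≠ i := by omega
      obtain ⟨hl, hpt⟩ := ih (j0+1) (by omega) (by omega)
        (F.set ((i:Int)+j0).toNat (F.getD ((i:Int)+j0).toNat 0 + F.getD i 0))
        (by simp [hF])
      refine ⟨hl, fun k => ?_⟩
      rw [hpt k, pvGetD_set F _ k _ hplen, pvGetD_set F _ i _ hplen, if_neg hpi]
      by_cases hpk : ((i:Int)+j0).toNat = k
      · subst hpk
        rw [if_pos rfl]
        split_ifs <;> omega
      · rw [if_neg hpk]
        split_ifs <;> omega
    · rw [if_neg hc]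
      obtain ⟨hl, hpt⟩ := ih (j0+1) (by omega) (by omega) F hF
      refine ⟨hl, fun k => ?_⟩
      rw [hpt k]
      split_ifs <;> omega

lemma pvSA_succ (A : List Int) (i : Nat) : pvSA A (i+1) = pvStepA A (pvSA A i) i := by
  unfold pvSA
  rw [List.range_succ, List.foldl_append, List.foldl_cons, List.foldl_nil]

lemma pvSB_succ (A : List Int) (i : Nat) : pvSB A (i+1) = pvStepB A (pvSB A i) i := by
  unfold pvSB
  rw [List.range_succ, List.foldl_append, List.foldl_cons, List.foldl_nil]

lemma pvInv (A : List Int) (hA : A ≠ []) : ∀ i, i ≤ A.length →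
    (pvSA A i).length = A.length ∧
    (pvSB A i).1.length = A.length + 1 ∧
    (pvSB A i).2.2 = (pvSA A i).take i ∧
    (pvSB A i).2.1 = pvPre (pvSB A i).1 i ∧
    ∀ k : Nat, i ≤ k → k < A.length → pvPre (pvSB A i).1 (k+1) = (pvSA A i).getD k 0 := by
  have hn : A.length ≠ 0 := by simpa using hA
  intro i
  induction i with
  | zero =>
    intro _
    refine ⟨by simp [pvSA], by simp [pvSB, hn], by simp [pvSB, pvSA], by simp [pvSB, pvPre], ?_⟩
    intro k _ hk
    simp only [pvSB, List.range_zero, List.foldl_nil, if_pos hn, pvSA]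
    unfold pvPre
    rw [pvSum_take_set _ 1 _ _ (by simp only [List.length_set, List.length_replicate]; omega),
      pvSum_take_set _ 0 _ _ (by simp only [List.length_replicate]; omega)]
    rw [pvGetD_set _ 0 1 _ (by simp only [List.length_replicate]; omega)]
    rw [pvGetD_set _ 0 k _ (by simp only [List.length_replicate]; omega)]
    have hrep : ∀ (m j : Nat), ((List.replicate m (0:Int)).take j).sum = 0 := by
      intro m j; simp [List.take_replicate]
    have hrepg : ∀ (m j : Nat), (List.replicate m (0:Int)).getD j 0 = 0 := by
      intro m j; simp [List.getD_eq_getElem?_getD, List.getElem?_replicate]; split_ifs <;> simp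
    simp only [hrep, hrepg]
    split_ifs <;> (try contradiction) <;> omega
  | succ i ih =>
    intro hii
    have hS : i < A.length := by omega
    obtain ⟨hFl, hdl, hout, hrun, hpre⟩ := ih (Nat.le_of_lt hS)
    -- inner-loop characterisation of A's step
    obtain ⟨hXl, hXpt⟩ := pvInnerGen A i (A.getD i 0 + 1) (A.getD i 0 + 1 - 1).toNat 1 le_rfl rfl
      (pvSA A i) hFl
    rw [pvSA_succ, pvSB_succ]
    rcases hsb : pvSB A i with ⟨d, r, o⟩
    simp only [hsb] at hdl hout hrun hpre ⊢
    have hdl' : d.length = A.length + 1 := hdl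
    have hrv : r + d.getD i 0 = (pvSA A i).getD i 0 := by
      rw [hrun, ← pvPre_succ d i (by omega)]
      exact hpre i le_rfl hS
    have htake1 : (pvSA A i).take (i+1) = (pvSA A i).take i ++ [(pvSA A i).getD i 0] := by
      rw [List.take_add_one]
      congr 1
      rw [List.getElem?_eq_getElem (by omega), List.getD_eq_getElem?_getD,
        List.getElem?_eq_getElem (by omega)]
      rfl
    have htakeX : (pvInner A i 1 (A.getD i 0 + 1) (pvSA A i)).take (i+1) = (pvSA A i).take (i+1) := by
      apply pvTake_eq _ _ (by omega)
      intro k hk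
      rw [hXpt k, if_neg (by omega)]; ring
    simp only [pvStepB, pvStepA]
    refine ⟨hXl, ?_, ?_, ?_, ?_⟩
    · split_ifs <;> simp [hdl']
    · rw [htakeX, htake1, hout, hrv]
    · split_ifs with h1 h2 h3 <;>
        (rw [hrun]
         unfold pvPre
         try rw [List.take_set_of_le (by omega), List.take_set_of_le (by omega)]
         rw [List.sum_take_succ d i (by omega),
           List.getD_eq_getElem?_getD, List.getElem?_eq_getElem (by omega)]
         rfl)
    · intro k hik hk
      have hXk := hXpt k
      have hdk : (d.take (k+1)).sum = (pvSA A i).getD k 0 := hpre k (by omega) hk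
      by_cases hmin : A.getD i 0 < (A.length:Int) - 1 - (i:Int)
      · rw [if_pos hmin]
        by_cases hge : A.getD i 0 ≥ 1
        · rw [if_pos hge]
          unfold pvPre
          rw [pvSum_take_set _ ((i:Int) + A.getD i 0 + 1).toNat _ (k+1)
              (by simp only [List.length_set]; omega),
            pvSum_take_set d (i+1) _ (k+1) (by omega)]
          rw [pvGetD_set d (i+1) ((i:Int) + A.getD i 0 + 1).toNat _ (by omega)]
          rw [hdk, hXk]
          split_ifs <;> omega
        · rw [if_neg hge]
          unfold pvPre
          rw [hdk, hXk, if_neg (by omega)]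
          ring
      · rw [if_neg hmin]
        by_cases hge : (A.length:Int) - 1 - (i:Int) ≥ 1
        · rw [if_pos hge]
          unfold pvPre
          rw [pvSum_take_set _ ((i:Int) + ((A.length:Int) - 1 - (i:Int)) + 1).toNat _ (k+1)
              (by simp only [List.length_set]; omega),
            pvSum_take_set d (i+1) _ (k+1) (by omega)]
          rw [pvGetD_set d (i+1) ((i:Int) + ((A.length:Int) - 1 - (i:Int)) + 1).toNat _ (by omega)]
          rw [hdk, hXk]
          split_ifs <;> omega
        · rw [if_neg hge]
          unfold pvPre
          rw [hdk, hXk, if_neg (by omega)]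
          ring

-- ===== VERDICT (by name: the statement is the Claim_ definition above) =====
theorem howManyWays_spec : Claim_equal_howManyWays := by
  intro A _ hA
  unfold Spec_howManyWays
  rw [pvHowA_eq, pvHowB_eq]
  obtain ⟨hlen, _, hout, _, _⟩ := pvInv A hA A.length le_rfl
  rw [hout, List.take_of_length_le (le_of_eq hlen)]
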